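-- pv_equiv track=rewrite | github.com/jacoboromerodiaz/context-mixing-audio-text | src/cmix/utils.py | build_audio_spans
-- ===== SOURCE A (Python) =====
-- from typing import Dict, Iterable, Tuple, List, Optional, Any
--
-- def _display_word_from_key(key: str) -> str:
--     """
--     Normalizes keys with index to display them without the index.
--     Supports formats like "12:word" or "(12,word)"; otherwise returns the key as is.
--     """
--     # Format (idx,word)
--     if key.startswith("(") and key.endswith(")") and "," in key:
--         inner = key[1:-1]
--         parts = inner.split(",", 1)
--         if len(parts) == 2:
--             return parts[1].strip()
--     # Format idx:word
--     if ":" in key: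
--         left, right = key.split(":", 1)
--         if left.isdigit():
--             return right.strip()
--     return key
--
-- def build_audio_spans(audio_dict: Dict[str, Iterable]) -> Tuple[List[str], List[int], List[int]]:
--     """
--     Given a dictionary mapping words to lists of tokens, constructs word spans using the hubert tokens.
--
--     Returns:
--       - audio_words: ['/' + word + '/'] in order
--       - audio_start_idx: start indices of words (0-based)
--       - audio_end_idx: end indices of words (0-based, inclusive)
--
--     Example:
--         input: {(0, 'more'): ['\U000f0108', '\U000f0108'], (1, 'than'): ['\U000f0119', '\U000f00d5']}
--         output: (['/more/', '/than/'], [0, 1], [2, 3])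
--     """
--     audio_words: List[str] = []
--     audio_start_idx: List[int] = []
--     audio_end_idx: List[int] = []
--
--     offset = 0
--     for key, vals in audio_dict.items():
--         n = len(vals)
--         disp_key = _display_word_from_key(str(key))
--         audio_words.append(f"/{disp_key}/")
--         audio_start_idx.append(offset)
--         offset += n-1
--         audio_end_idx.append(offset)
--         offset += 1
--
--     return audio_words, audio_start_idx, audio_end_idx
-- ===== SOURCE B (Python) =====
-- from itertools import accumulate
-- from typing import Dict, Iterable, Tuple, List
--
--
-- def _display_word_from_key(key: str) -> str:
--     if key.startswith("(") and key.endswith(")") and "," in key: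
--         inner = key[1:-1]
--         parts = inner.split(",", 1)
--         if len(parts) == 2:
--             return parts[1].strip()
--     if ":" in key:
--         left, right = key.split(":", 1)
--         if left.isdigit():
--             return right.strip()
--     return key
--
--
-- def build_audio_spans(audio_dict: Dict[str, Iterable]) -> Tuple[List[str], List[int], List[int]]:
--     counts = [len(v) for v in audio_dict.values()]
--     audio_words = [f"/{_display_word_from_key(str(k))}/" for k in audio_dict]
--     cum = list(accumulate(counts))
--     audio_end_idx = [c - 1 for c in cum]
--     audio_start_idx = [c - n for c, n in zip(cum, counts)]
--     return audio_words, audio_start_idx, audio_end_idx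
-- ===== Notes on version B (the rewrite author's own statement) =====
-- stated objective: alternative
-- what changed: Replaces the single loop threading a mutable running offset with separate comprehension passes: a counts table, an itertools.accumulate prefix-sum, and zip-derived start/end lists.
import Mathlib
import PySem

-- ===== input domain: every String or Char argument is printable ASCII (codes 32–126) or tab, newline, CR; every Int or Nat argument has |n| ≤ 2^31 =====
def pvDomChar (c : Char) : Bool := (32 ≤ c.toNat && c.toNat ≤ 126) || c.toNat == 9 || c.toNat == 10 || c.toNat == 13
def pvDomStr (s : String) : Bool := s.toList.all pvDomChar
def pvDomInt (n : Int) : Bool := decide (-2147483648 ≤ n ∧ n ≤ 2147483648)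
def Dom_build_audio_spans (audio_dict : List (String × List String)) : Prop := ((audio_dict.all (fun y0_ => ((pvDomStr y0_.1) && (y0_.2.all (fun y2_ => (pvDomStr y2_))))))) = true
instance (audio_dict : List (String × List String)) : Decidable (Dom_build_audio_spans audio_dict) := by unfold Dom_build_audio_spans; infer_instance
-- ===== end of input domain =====

-- B replaces A's offset-threading loop with map/accumulate/zip passes; objective: alternative decomposition (same cost).


-- ===== PORT A =====
-- shared helper _display_word_from_key (B reuses it verbatim in Source B)
def dispWord (key : String) : String :=
  -- Format (idx,word)
  if PySem.Str.startswith key "(" && PySem.Str.endswith key ")" && PySem.Str.isIn "," key then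
    let inner := PySem.Str.slice key (some 1) (some (-1))
    match PySem.Str.splitMax? inner "," 1 with
    | some [_, p] => PySem.Str.strip p        -- len(parts) == 2: return parts[1].strip()
    | _ => dispColon key
  else dispColon key
where
  -- Format idx:word  (fall-through tail of the Python function)
  dispColon (key : String) : String :=
    if PySem.Str.isIn ":" key then
      match PySem.Str.splitMax? key ":" 1 with
      | some [left, right] =>
          if PySem.Str.strIsdigit left then PySem.Str.strip right else key
      | _ => key
    else key

-- the body of A's for-loop, one step over the running state (words, starts, ends, offset)
def stepA (st : List String × List Int × List Int × Int) (kv : String × List String) :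
    List String × List Int × List Int × Int :=
  let (ws, ss, es, offset) := st
  let n : Int := kv.2.length
  let disp_key := dispWord kv.1
  (ws ++ ["/" ++ disp_key ++ "/"], ss ++ [offset], es ++ [offset + (n - 1)], offset + (n - 1) + 1)

def build_audio_spans (audio_dict : List (String × List String)) : List String × List Int × List Int :=
  let r := audio_dict.foldl stepA ([], [], [], 0)
  (r.1, r.2.1, r.2.2.1)

-- ===== PORT B =====
-- itertools.accumulate of the counts, starting from a running total `off`
def accumInt (off : Int) : List Int → List Int
  | [] => []
  | c :: cs => (off + c) :: accumInt (off + c) cs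

def build_audio_spans_alt (audio_dict : List (String × List String)) : List String × List Int × List Int :=
  let counts := audio_dict.map (fun kv => (kv.2.length : Int))
  let audio_words := audio_dict.map (fun kv => "/" ++ dispWord kv.1 ++ "/")
  let cum := accumInt 0 counts
  let audio_end_idx := cum.map (fun c => c - 1)
  let audio_start_idx := List.zipWith (fun c n => c - n) cum counts
  (audio_words, audio_start_idx, audio_end_idx)

-- ===== PRECONDITION & SPEC =====
def Spec_build_audio_spans (audio_dict : List (String × List String)) (out : List String × List Int × List Int) : Prop := out = build_audio_spans_alt audio_dict
instance (audio_dict : List (String × List String)) (out : List String × List Int × List Int) : Decidable (Spec_build_audio_spans audio_dict out) := by unfold Spec_build_audio_spans; infer_instance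

-- ===== CLAIM (what is proved, stated in full; the proofs are below) =====
def Claim_equal_build_audio_spans : Prop := ∀ (audio_dict : List (String × List String)), Dom_build_audio_spans audio_dict → Spec_build_audio_spans audio_dict (build_audio_spans audio_dict)

-- ===== LEMMAS AND PROOFS =====

-- loop invariant: A's fold from any state equals the accumulated lists appended with B's tables built from offset `off`
theorem foldA_eq (l : List (String × List String)) :
    ∀ (ws : List String) (ss es : List Int) (off : Int),
    l.foldl stepA (ws, ss, es, off)
      = (ws ++ l.map (fun kv => "/" ++ dispWord kv.1 ++ "/"),
         ss ++ List.zipWith (fun c n => c - n)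
                 (accumInt off (l.map fun kv => (kv.2.length : Int)))
                 (l.map fun kv => (kv.2.length : Int)),
         es ++ (accumInt off (l.map fun kv => (kv.2.length : Int))).map (fun c => c - 1),
         off + (l.map fun kv => (kv.2.length : Int)).sum) := by
  induction l with
  | nil => intro ws ss es off; simp [accumInt]
  | cons kv rest ih =>
    intro ws ss es off
    have hoff : off + ((kv.2.length : Int) - 1) + 1 = off + (kv.2.length : Int) := by ring
    simp only [List.foldl_cons, stepA, List.map_cons, accumInt, List.zipWith_cons_cons,
      List.map, List.sum_cons, hoff, ih, Prod.mk.injEq]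
    refine ⟨?_, ?_, ?_, ?_⟩
    · simp
    · simp only [List.append_assoc, List.cons_append, List.nil_append]
      congr 2
      ring
    · simp only [List.append_assoc, List.cons_append, List.nil_append]
      congr 2
      ring
    · ring

-- ===== VERDICT (by name: the statement is the Claim_ definition above) =====
theorem build_audio_spans_spec : Claim_equal_build_audio_spans := by
  intro audio_dict _
  unfold Spec_build_audio_spans build_audio_spans build_audio_spans_alt
  simp [foldA_eq]
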